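-- pv_equiv track=rewrite | github.com/bilalakil/challenges | hackerrank/hourrank-27/impressing-the-boss.py | canModify
-- ===== SOURCE A (Python) =====
-- def canModify(a):
--     '''
--     Brute forced, considering the very small limits:
--     20 test cases with a maximum of 20 elements in the list.
--     '''
--
--     for i in range(len(a)):
--         new_a = a[:i] + a[i+1:]
--
--         prev = -1
--         good = True
--
--         for n in new_a:
--             if n < prev:
--                 good = False
--                 break
--
--             prev = n
--
--         if good:
--             return 'YES'
--
--     return 'NO'
-- ===== SOURCE B (Python) =====
-- def _first_descent(xs):
--     i = 0
--     while i + 1 < len(xs):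
--         if xs[i] > xs[i + 1]:
--             return i
--         i += 1
--     return None
--
--
-- def _nondec(xs):
--     i = 0
--     while i + 1 < len(xs):
--         if xs[i] > xs[i + 1]:
--             return False
--         i += 1
--     return True
--
--
-- def canModify(a):
--     d = _first_descent(a)
--     if d is None:
--         return 'YES'
--     if _nondec(a[:d] + a[d + 1:]) or _nondec(a[:d + 1] + a[d + 2:]):
--         return 'YES'
--     return 'NO'
-- ===== Notes on version B (the rewrite author's own statement) =====
-- stated objective: faster
-- what changed: A tries every one-element removal and rescans the whole remainder each time (O(n^2)); B finds the first descent in one pass and only checks the two candidate removals at that point (O(n)).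
-- intended difference: On inputs where the intended answer is YES but A says NO -- the empty list (A's removal loop never runs so it falls through to 'NO') and lists whose every non-decreasing one-element removal starts below -1 (e.g. [-2,-3], rejected by A's sentinel prev=-1) -- A returns 'NO' while B returns 'YES', the intended answer to whether removing at most one element leaves a non-decreasing array. — e.g. on canModify([-2, -3]): A returns "NO", B returns "YES"
import Mathlib
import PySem

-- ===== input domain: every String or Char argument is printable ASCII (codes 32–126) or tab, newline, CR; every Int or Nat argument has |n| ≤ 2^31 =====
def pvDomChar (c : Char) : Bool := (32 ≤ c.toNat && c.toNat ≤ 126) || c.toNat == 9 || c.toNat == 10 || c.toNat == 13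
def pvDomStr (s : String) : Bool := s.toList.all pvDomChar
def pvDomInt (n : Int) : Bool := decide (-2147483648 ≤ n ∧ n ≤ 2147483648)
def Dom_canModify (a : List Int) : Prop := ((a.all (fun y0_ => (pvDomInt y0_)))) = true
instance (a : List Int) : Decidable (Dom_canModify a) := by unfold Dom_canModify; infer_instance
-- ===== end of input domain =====

-- B replaces A's try-every-removal O(n^2) scan by a single pass that finds the first descent
-- and checks only the two candidate removals there (O(n)); where A's fall-through 'NO' on the
-- empty list or its sentinel prev=-1 makes it answer 'NO' although one removal (or none) leaves
-- a non-decreasing array, B answers the intended 'YES' (see D_).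

-- ===== PORT A =====
-- inner loop: 'prev = -1; for n in new_a: if n < prev: good=False; break; prev = n'
def chkA (prev : Int) : List Int → Bool
  | [] => true
  | n :: t => if n < prev then false else chkA n t

-- outer loop 'for i in range(len(a)): new_a = a[:i] + a[i+1:]; … if good: return "YES"'
def loopA (a : List Int) : List Int → String
  | [] => "NO"
  | i :: rest =>
    let new_a := PySem.List.slice a none (some i) ++ PySem.List.slice a (some (i + 1)) none
    if chkA (-1) new_a then "YES" else loopA a rest

def canModify (a : List Int) : String := loopA a (PySem.List.pyRange 0 (a.length : Int) 1)

-- ===== PORT B =====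
-- 'while i+1 < len(xs): if xs[i] > xs[i+1]: return i; i += 1; return None'
def firstDescent : List Int → Option Nat
  | x :: y :: t => if x > y then some 0 else (firstDescent (y :: t)).map (· + 1)
  | _ => none

-- 'while i+1 < len(xs): if xs[i] > xs[i+1]: return False; i += 1; return True'
def nondec : List Int → Bool
  | x :: y :: t => if x > y then false else nondec (y :: t)
  | _ => true

-- slices a[:d]+a[d+1:] are exact as take/drop since d : Nat is nonnegative
def canModify_alt (a : List Int) : String :=
  match firstDescent a with
  | none => "YES"
  | some d =>
    if nondec (a.take d ++ a.drop (d + 1)) || nondec (a.take (d + 1) ++ a.drop (d + 2)) then "YES"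
    else "NO"

-- ===== PRECONDITION & SPEC =====
-- On inputs where the intended answer is YES but A says NO — the empty list (A's removal loop
-- never runs, so it falls through to 'NO') and lists whose every non-decreasing one-element
-- removal starts below -1 (e.g. [-2,-3], rejected by A's sentinel prev=-1) — A returns 'NO'
-- while B returns 'YES', the intended answer.
def D_canModify (a : List Int) : Prop :=
  (a = [] ∨ ∃ i < a.length, List.IsChain (· ≤ ·) (a.eraseIdx i)) ∧
  ¬ (∃ i < a.length, List.IsChain (· ≤ ·) ((-1 : Int) :: a.eraseIdx i))
instance (a : List Int) : Decidable (D_canModify a) := by unfold D_canModify; infer_instance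

def Spec_canModify (a : List Int) (out : String) : Prop := ¬ D_canModify a → out = canModify_alt a
instance (a : List Int) (out : String) : Decidable (Spec_canModify a out) := by
  unfold Spec_canModify; infer_instance

def pvDiffWitness_canModify : List Int := [-2, -3]
def pvDiffWitnessOut_canModify : String × String := ("NO", "YES")

-- ===== CLAIM (what is proved, stated in full; the proofs are below) =====
def Claim_unchanged_canModify : Prop := ∀ (a : List Int), Dom_canModify a → Spec_canModify a (canModify a)
def Claim_changed_canModify : Prop := Dom_canModify (pvDiffWitness_canModify) ∧ D_canModify (pvDiffWitness_canModify) ∧ canModify (pvDiffWitness_canModify) = pvDiffWitnessOut_canModify.1 ∧ canModify_alt (pvDiffWitness_canModify) = pvDiffWitnessOut_canModify.2 ∧ pvDiffWitnessOut_canModify.1 ≠ pvDiffWitnessOut_canModify.2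
def Claim_exact_canModify : Prop := ∀ (a : List Int), Dom_canModify a → D_canModify a → canModify a ≠ canModify_alt a

-- ===== LEMMAS AND PROOFS =====

theorem chkA_iff (l : List Int) (p : Int) :
    chkA p l = true ↔ List.IsChain (· ≤ ·) (p :: l) := by
  induction l generalizing p with
  | nil => simp [chkA]
  | cons n t ih =>
    rw [chkA, List.isChain_cons_cons]
    by_cases h : n < p
    · simp [h]
    · rw [if_neg h, ih n]
      exact ⟨fun hc => ⟨by omega, hc⟩, fun hc => hc.2⟩

theorem nondec_iff (l : List Int) :
    nondec l = true ↔ List.IsChain (· ≤ ·) l := by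
  induction l with
  | nil => simp [nondec]
  | cons x t ih =>
    cases t with
    | nil => simp [nondec]
    | cons y s =>
      rw [nondec, List.isChain_cons_cons]
      by_cases h : x > y
      · simp [h]
      · rw [if_neg h, ih]
        exact ⟨fun hc => ⟨by omega, hc⟩, fun hc => hc.2⟩

theorem loopA_char (a : List Int) (idxs : List Int) :
    loopA a idxs =
      if ∃ i ∈ idxs,
          chkA (-1) (PySem.List.slice a none (some i) ++ PySem.List.slice a (some (i + 1)) none)
            = true
        then "YES" else "NO" := by
  induction idxs with
  | nil => simp [loopA]
  | cons i rest ih =>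
    rw [loopA]
    by_cases h : chkA (-1)
        (PySem.List.slice a none (some i) ++ PySem.List.slice a (some (i + 1)) none) = true
    · rw [if_pos h, if_pos ⟨i, List.mem_cons_self, h⟩]
    · rw [if_neg h, ih]
      apply if_congr _ rfl rfl
      constructor
      · rintro ⟨x, hx, hPx⟩; exact ⟨x, List.mem_cons_of_mem _ hx, hPx⟩
      · rintro ⟨x, hx, hPx⟩
        rcases List.mem_cons.mp hx with rfl | hx'
        · exact absurd hPx h
        · exact ⟨x, hx', hPx⟩

theorem A_char (a : List Int) :
    canModify a =
      if ∃ i < a.length, List.IsChain (· ≤ ·) ((-1 : Int) :: a.eraseIdx i)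
        then "YES" else "NO" := by
  rw [canModify, loopA_char]
  congr 1
  apply propext
  constructor
  · rintro ⟨i, hmem, hchk⟩
    rw [PySem.List.mem_pyRange_one] at hmem
    obtain ⟨h0, hlt⟩ := hmem
    refine ⟨i.toNat, by omega, ?_⟩
    rw [PySem.List.slice_to _ h0, PySem.List.slice_from _ (by omega : (0:Int) ≤ i + 1)] at hchk
    have h1 : (i + 1).toNat = i.toNat + 1 := by omega
    rw [h1, ← List.eraseIdx_eq_take_drop_succ, chkA_iff] at hchk
    exact hchk
  · rintro ⟨k, hk, hch⟩
    refine ⟨(k : Int), ?_, ?_⟩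
    · rw [PySem.List.mem_pyRange_one]; omega
    · rw [PySem.List.slice_to_natCast]
      have h1 : ((k : Int) + 1) = ((k + 1 : Nat) : Int) := by push_cast; ring
      rw [h1, PySem.List.slice_from_natCast, ← List.eraseIdx_eq_take_drop_succ, chkA_iff]
      exact hch

theorem fd_none (l : List Int) (h : firstDescent l = none) : List.IsChain (· ≤ ·) l := by
  induction l with
  | nil => simp
  | cons x t ih =>
    cases t with
    | nil => simp
    | cons y s =>
      rw [firstDescent] at h
      by_cases hxy : x > y
      · simp [hxy] at h
      · rw [if_neg hxy, Option.map_eq_none_iff] at h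
        rw [List.isChain_cons_cons]
        exact ⟨by omega, ih h⟩

theorem fd_some (l : List Int) (d : Nat) (h : firstDescent l = some d) :
    d + 1 < l.length ∧ ∀ x y, l[d]? = some x → l[d + 1]? = some y → y < x := by
  induction l generalizing d with
  | nil => simp [firstDescent] at h
  | cons x t ih =>
    cases t with
    | nil => simp [firstDescent] at h
    | cons y s =>
      rw [firstDescent] at h
      by_cases hxy : x > y
      · rw [if_pos hxy, Option.some_inj] at h
        subst h
        refine ⟨by simp only [List.length_cons]; omega, ?_⟩
        intro u v hu hv
        simp at hu hv
        omega
      · rw [if_neg hxy, Option.map_eq_some_iff] at h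
        obtain ⟨d', hd', rfl⟩ := h
        obtain ⟨hlen, hval⟩ := ih d' hd'
        refine ⟨by simpa using Nat.add_lt_add_right hlen 1, ?_⟩
        intro u v hu hv
        exact hval u v (by simpa using hu) (by simpa using hv)

-- adjacent pair (d, d+1) of a survives removing index j ∉ {d, d+1}
theorem pair_le (a : List Int) (j d : Nat) (hj : j < a.length) (hd : d + 1 < a.length)
    (h1 : j ≠ d) (h2 : j ≠ d + 1) (hc : List.IsChain (· ≤ ·) (a.eraseIdx j)) :
    a[d]'(by omega) ≤ a[d + 1]'hd := by
  rw [List.isChain_iff_getElem] at hc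
  have hlen : (a.eraseIdx j).length = a.length - 1 := List.length_eraseIdx_of_lt hj
  rcases Nat.lt_or_ge j d with hjd | hjd
  · -- j < d : pair sits at positions d-1, d of the removal
    have hd1 : d - 1 + 1 < (a.eraseIdx j).length := by omega
    have := hc (d - 1) hd1
    have e1 : (a.eraseIdx j)[d - 1]? = a[d]? := by
      rw [List.getElem?_eraseIdx_of_ge (by omega : j ≤ d - 1)]
      congr 1; omega
    have e2 : (a.eraseIdx j)[d - 1 + 1]? = a[d + 1]? := by
      rw [List.getElem?_eraseIdx_of_ge (by omega : j ≤ d - 1 + 1)]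
      congr 1; omega
    rw [List.getElem?_eq_getElem (by omega), List.getElem?_eq_getElem (by omega)] at e1
    rw [List.getElem?_eq_getElem (by omega), List.getElem?_eq_getElem (by omega)] at e2
    rw [Option.some_inj] at e1 e2
    rw [e1, e2] at this
    exact this
  · -- d + 2 ≤ j : pair sits at positions d, d+1 of the removal
    have hj2 : d + 2 ≤ j := by omega
    have hd1 : d + 1 < (a.eraseIdx j).length := by omega
    have := hc d hd1
    have e1 : (a.eraseIdx j)[d]? = a[d]? := List.getElem?_eraseIdx_of_lt (by omega)
    have e2 : (a.eraseIdx j)[d + 1]? = a[d + 1]? := List.getElem?_eraseIdx_of_lt (by omega)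
    rw [List.getElem?_eq_getElem (by omega), List.getElem?_eq_getElem (by omega)] at e1
    rw [List.getElem?_eq_getElem (by omega), List.getElem?_eq_getElem (by omega)] at e2
    rw [Option.some_inj] at e1 e2
    rw [e1, e2] at this
    exact this

theorem B_char (a : List Int) :
    canModify_alt a =
      if a = [] ∨ ∃ i < a.length, List.IsChain (· ≤ ·) (a.eraseIdx i) then "YES" else "NO" := by
  cases hfd : firstDescent a with
  | none =>
    cases a with
    | nil => simp [canModify_alt, firstDescent]
    | cons x t =>
      have hch := fd_none _ hfd
      have h0 : (x :: t) = [] ∨ ∃ i < (x :: t).length, List.IsChain (· ≤ ·) ((x :: t).eraseIdx i) :=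
        Or.inr ⟨0, by simp, by simpa using hch.tail⟩
      simp only [canModify_alt, hfd]
      rw [if_pos h0]
  | some d =>
    obtain ⟨hd, hlt⟩ := fd_some a d hfd
    have hne : a ≠ [] := by intro h; subst h; simp at hd
    have e1 : a.take d ++ a.drop (d + 1) = a.eraseIdx d := by
      rw [List.eraseIdx_eq_take_drop_succ]
    have e2 : a.take (d + 1) ++ a.drop (d + 2) = a.eraseIdx (d + 1) := by
      rw [List.eraseIdx_eq_take_drop_succ]
    simp only [canModify_alt, hfd]
    rw [e1, e2]
    by_cases hcond : ∃ i < a.length, List.IsChain (· ≤ ·) (a.eraseIdx i)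
    · rw [if_pos (Or.inr hcond)]
      obtain ⟨j, hjl, hjc⟩ := hcond
      have : nondec (a.eraseIdx d) = true ∨ nondec (a.eraseIdx (d + 1)) = true := by
        by_cases hjd : j = d
        · left; rw [nondec_iff]; exact hjd ▸ hjc
        · by_cases hjd1 : j = d + 1
          · right; rw [nondec_iff]; exact hjd1 ▸ hjc
          · exfalso
            have hle := pair_le a j d hjl hd hjd hjd1 hjc
            have := hlt (a[d]'(by omega)) (a[d + 1]'hd)
              (List.getElem?_eq_getElem _) (List.getElem?_eq_getElem _)
            omega
      rcases this with h | h <;> simp [h]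
    · have hno : ¬(a = [] ∨ ∃ i < a.length, List.IsChain (· ≤ ·) (a.eraseIdx i)) := by
        rintro (h | h)
        · exact hne h
        · exact hcond h
      rw [if_neg hno]
      have h1 : nondec (a.eraseIdx d) = false :=
        Bool.eq_false_iff.mpr (fun h => hcond ⟨d, by omega, (nondec_iff _).mp h⟩)
      have h2 : nondec (a.eraseIdx (d + 1)) = false :=
        Bool.eq_false_iff.mpr (fun h => hcond ⟨d + 1, by omega, (nondec_iff _).mp h⟩)
      simp [h1, h2]

-- ===== VERDICT (by name: the statement is the Claim_ definition above) =====
theorem canModify_spec : Claim_unchanged_canModify := by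
  intro a _ hnD
  unfold D_canModify at hnD
  rw [A_char, B_char]
  have hAB : (∃ i < a.length, List.IsChain (· ≤ ·) ((-1 : Int) :: a.eraseIdx i)) ↔
      (a = [] ∨ ∃ i < a.length, List.IsChain (· ≤ ·) (a.eraseIdx i)) := by
    constructor
    · rintro ⟨i, hi, hch⟩; exact Or.inr ⟨i, hi, by simpa using hch.tail⟩
    · intro hQ
      by_cases hP : ∃ i < a.length, List.IsChain (· ≤ ·) ((-1 : Int) :: a.eraseIdx i)
      · exact hP
      · exact absurd ⟨hQ, hP⟩ hnD
  rw [if_congr hAB rfl rfl]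

theorem canModify_changed : Claim_changed_canModify := by
  unfold Claim_changed_canModify; decide

theorem canModify_tight : Claim_exact_canModify := by
  intro a _ hD
  unfold D_canModify at hD
  obtain ⟨hQ, hnP⟩ := hD
  rw [A_char, B_char, if_neg hnP, if_pos hQ]
  decide
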